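-- pv_equiv track=rewrite | github.com/rowancallahan/speaky | spoken_python.py | process_enchant_string
-- ===== SOURCE A (Python) =====
-- def process_enchant_string(body):
--     """enchant with string: builds an f-string from a template with variable slots.
--
--     Grammar:
--         enchant with string <text with {varnames} embedded>
--         Words that are variable names get wrapped in {}, rest becomes literal text.
--
--     To mark a variable: use 'variable <name>' or 'var <name>'
--     Everything else is literal text.
--
--     Examples:
--         enchant with string hello variable name you are variable age years old
--         → f"hello {name} you are {age} years old"
--
--         enchant with string the result is variable x
--         → f"the result is {x}"
--     """
--     parts = []
--     words = body.split()
--     i = 0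
--     while i < len(words):
--         if words[i] in ("variable", "var") and i + 1 < len(words):
--             parts.append("{" + words[i + 1] + "}")
--             i += 2
--         else:
--             parts.append(words[i])
--             i += 1
--     return 'f"' + " ".join(parts) + '"'
-- ===== SOURCE B (Python) =====
-- def process_enchant_string(body):
--     def go(ws):
--         if not ws:
--             return []
--         if ws[0] in ("variable", "var") and len(ws) >= 2:
--             return ["{" + ws[1] + "}"] + go(ws[2:])
--         return [ws[0]] + go(ws[1:])
--     return 'f"' + " ".join(go(body.split())) + '"'
-- ===== Notes on version B (the rewrite author's own statement) =====
-- stated objective: alternative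
-- what changed: replaces the index-based while loop with lookahead (i, i+1, manual stepping by 1 or 2 over a shared index and an accumulator list) by direct structural recursion on the word list that pattern-matches a keyword together with its following name and recurses on the tail
import Mathlib
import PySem

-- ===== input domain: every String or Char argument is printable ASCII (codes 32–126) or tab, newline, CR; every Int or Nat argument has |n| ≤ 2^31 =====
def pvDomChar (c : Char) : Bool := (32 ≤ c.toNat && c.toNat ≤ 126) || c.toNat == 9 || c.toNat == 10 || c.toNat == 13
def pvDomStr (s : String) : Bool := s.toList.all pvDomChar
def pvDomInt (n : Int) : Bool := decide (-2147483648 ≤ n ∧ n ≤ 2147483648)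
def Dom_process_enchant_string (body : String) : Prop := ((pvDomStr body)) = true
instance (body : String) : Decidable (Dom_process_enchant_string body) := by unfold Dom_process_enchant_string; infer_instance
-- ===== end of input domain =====

-- B replaces A's index-based while loop with lookahead by structural recursion on the word list (alternative decomposition, same cost).

-- ===== PORT A =====
-- A's while loop: index i over `words`, accumulator `parts`
def pvLoopA (words : List String) (i : Nat) (parts : List String) : List String :=
  if _h : i < words.length then
    let w := words.getD i ""
    if (w == "variable" || w == "var") && i + 1 < words.length then
      pvLoopA words (i + 2) (parts ++ ["{" ++ words.getD (i + 1) "" ++ "}"])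
    else
      pvLoopA words (i + 1) (parts ++ [w])
  else parts
termination_by words.length - i

def process_enchant_string (body : String) : String :=
  "f\"" ++ PySem.Str.join " " (pvLoopA (PySem.Str.split₀ body) 0 []) ++ "\""

-- ===== PORT B =====
-- B's structural recursion `go` over the word list
def pvGoB : List String → List String
  | [] => []
  | w :: rest =>
    if (w == "variable" || w == "var") && rest.length ≥ 1 then
      match rest with
      | name :: rest2 => ("{" ++ name ++ "}") :: pvGoB rest2
      | [] => [w]
    else w :: pvGoB rest

def process_enchant_string_alt (body : String) : String :=
  "f\"" ++ PySem.Str.join " " (pvGoB (PySem.Str.split₀ body)) ++ "\""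

-- ===== PRECONDITION & SPEC =====
def Spec_process_enchant_string (body : String) (out : String) : Prop := out = process_enchant_string_alt body
instance (body : String) (out : String) : Decidable (Spec_process_enchant_string body out) := by unfold Spec_process_enchant_string; infer_instance

-- ===== CLAIM (what is proved, stated in full; the proofs are below) =====
def Claim_equal_process_enchant_string : Prop := ∀ (body : String), Dom_process_enchant_string body → Spec_process_enchant_string body (process_enchant_string body)

-- ===== LEMMAS AND PROOFS =====


theorem pvGoB_cons_pos (w name : String) (rest : List String)
    (hc : (w == "variable" || w == "var") = true) :
    pvGoB (w :: name :: rest) = ("{" ++ name ++ "}") :: pvGoB rest := by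
  simp [pvGoB, hc]

theorem pvGoB_singleton (w : String) : pvGoB [w] = [w] := by
  by_cases hc : (w == "variable" || w == "var") = true <;> simp [pvGoB, hc]

theorem pvGoB_cons_neg (w : String) (rest : List String)
    (hc : ¬ (w == "variable" || w == "var") = true) :
    pvGoB (w :: rest) = w :: pvGoB rest := by
  cases rest <;> simp [pvGoB, hc]

theorem pvLoopA_eq_goB (words : List String) :
    ∀ n i parts, words.length - i ≤ n →
      pvLoopA words i parts = parts ++ pvGoB (words.drop i) := by
  intro n
  induction n with
  | zero =>
    intro i parts h
    have hge : words.length ≤ i := by omega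
    unfold pvLoopA
    simp [Nat.not_lt.mpr hge, List.drop_eq_nil_of_le hge, pvGoB]
  | succ n ih =>
    intro i parts h
    unfold pvLoopA
    by_cases hi : i < words.length
    · have hdrop : words.drop i = words[i] :: words.drop (i + 1) :=
        List.drop_eq_getElem_cons hi
      have hw : words.getD i "" = words[i] := List.getD_eq_getElem words "" hi
      simp only [hi, dif_pos, hw]
      rw [hdrop]
      by_cases hcond : (words[i] == "variable" || words[i] == "var") = true
      · by_cases hi1 : i + 1 < words.length
        · have hdrop1 : words.drop (i + 1) = words[i+1] :: words.drop (i + 2) :=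
            List.drop_eq_getElem_cons hi1
          have hw1 : words.getD (i + 1) "" = words[i+1] := List.getD_eq_getElem words "" hi1
          rw [hdrop1]
          simp only [hcond, hi1, decide_true, Bool.and_true, if_pos, hw1]
          rw [ih (i + 2) _ (by omega)]
          rw [pvGoB_cons_pos _ _ _ hcond]
          simp
        · have hdrop1 : words.drop (i + 1) = [] := List.drop_eq_nil_of_le (by omega)
          rw [hdrop1]
          have : ¬ ((words[i] == "variable" || words[i] == "var") && decide (i + 1 < words.length)) = true := by
            simp [hi1]
          rw [if_neg this]
          rw [ih (i + 1) _ (by omega), hdrop1]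
          rw [pvGoB_singleton]
          simp [pvGoB]
      · have : ¬ ((words[i] == "variable" || words[i] == "var") && decide (i + 1 < words.length)) = true := by
          simp at hcond ⊢; tauto
        rw [if_neg this]
        rw [ih (i + 1) _ (by omega)]
        rw [pvGoB_cons_neg _ _ hcond]
        simp
    · simp [hi, List.drop_eq_nil_of_le (Nat.not_lt.mp hi), pvGoB]

-- ===== VERDICT (by name: the statement is the Claim_ definition above) =====
theorem process_enchant_string_spec : Claim_equal_process_enchant_string := by
  intro body _
  unfold Spec_process_enchant_string process_enchant_string process_enchant_string_alt
  rw [pvLoopA_eq_goB _ (PySem.Str.split₀ body).length 0 [] (by omega)]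
  simp
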